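-- pv_equiv track=rewrite | github.com/Nick34567890/lfa-python | lab4/regex_parser.py | parse_repeat_range
-- ===== SOURCE A (Python) =====
-- def parse_repeat_range(pattern, position):
--     min_repeat = 0
--     max_repeat = 0
--
--     # Read the minimum repeat value
--     while position < len(pattern) and pattern[position].isdigit():
--         min_repeat = min_repeat * 10 + int(pattern[position])
--         position += 1
--
--     if position < len(pattern) and pattern[position] == ',':
--         position += 1  # Skip the comma
--         # Read the maximum repeat value
--         while position < len(pattern) and pattern[position].isdigit():
--             max_repeat = max_repeat * 10 + int(pattern[position])
--             position += 1
--
--     if position < len(pattern) and pattern[position] == '}':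
--         position += 1
--     else:
--         raise ValueError("Expected closing '}' for repetition range")
--
--     # Handle case where max_repeat is not provided
--     if max_repeat == 0:
--         max_repeat = -1  # Means unlimited repetitions
--
--     return min_repeat, max_repeat, position
-- ===== SOURCE B (Python) =====
-- # Delimiter-first parse: locate the closing '}', slice out the body, split it
-- # at the comma and convert each validated side to a number.
-- def _to_int(digits):
--     value = 0
--     for ch in digits:
--         value = value * 10 + int(ch)
--     return value
--
--
-- def parse_repeat_range(pattern, position):
--     end = pattern.find('}', position)
--     if end == -1:
--         raise ValueError("Expected closing '}' for repetition range")
--     body = pattern[position:end]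
--     head, _, tail = body.partition(',')
--     if not all(c.isdigit() for c in head) or not all(c.isdigit() for c in tail):
--         raise ValueError("Expected closing '}' for repetition range")
--     min_repeat = _to_int(head)
--     max_repeat = _to_int(tail)
--     if max_repeat == 0:
--         max_repeat = -1  # unlimited / not provided
--     return min_repeat, max_repeat, position + len(body) + 1
-- ===== Notes on version B (the rewrite author's own statement) =====
-- stated objective: alternative
-- what changed: B replaces the two incremental digit-scanning while-loops with a delimiter-first strategy: find the closing '}', slice out the whole body, split it at the comma, validate each part with isdigit and convert it to a number; Pre_ excludes inputs on which A raises and negative positions whose digit scan runs past the end of the string, where A's value comes from accidental negative-index wraparound to the string's start while B raises.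
-- outside the precondition, e.g. on parse_repeat_range('2}34', -2): A returns (342, -1, 2), B raises ValueError
import Mathlib
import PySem

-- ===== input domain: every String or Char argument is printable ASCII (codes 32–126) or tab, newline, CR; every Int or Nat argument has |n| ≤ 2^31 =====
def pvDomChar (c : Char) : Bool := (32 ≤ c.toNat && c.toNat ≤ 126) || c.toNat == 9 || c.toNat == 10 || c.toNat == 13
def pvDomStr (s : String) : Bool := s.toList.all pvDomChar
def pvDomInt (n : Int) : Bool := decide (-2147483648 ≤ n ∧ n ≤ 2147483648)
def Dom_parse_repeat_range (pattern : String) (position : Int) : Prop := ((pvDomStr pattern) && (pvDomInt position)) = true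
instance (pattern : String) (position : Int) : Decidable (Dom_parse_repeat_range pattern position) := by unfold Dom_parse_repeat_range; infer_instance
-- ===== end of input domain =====

-- B parses delimiter-first: find the closing '}', slice out the body, split at the comma and
-- convert each validated side (objective: alternative decomposition; same asymptotic cost).

-- ===== PORT A =====
-- the two identical while-loops of A: scan ASCII digits from `pos`, Horner-accumulating into `acc`
-- (Python's `pattern[position].isdigit()` / `int(pattern[position])`; exact on the ASCII domain Dom;
--  a `none` from pyGet? is Python's IndexError — that path is outside Pre_ and the loop just stops)
def pvAScan (cs : List Char) (pos acc : Int) : Int × Int :=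
  if h : pos < (cs.length : Int) ∧ ((PySem.List.pyGet? cs pos).map Char.isDigit).getD false = true then
    pvAScan cs (pos + 1) (acc * 10 + ((((PySem.List.pyGet? cs pos).getD '0').toNat : Int) - 48))
  else (acc, pos)
termination_by ((cs.length : Int) - pos).toNat
decreasing_by omega

def parse_repeat_range (pattern : String) (position : Int) : Int × Int × Int :=
  let cs := pattern.toList
  let r1 := pvAScan cs position 0
  let r2 := if r1.2 < (cs.length : Int) ∧ PySem.List.pyGet? cs r1.2 = some ',' then
              pvAScan cs (r1.2 + 1) 0
            else (0, r1.2)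
  if r2.2 < (cs.length : Int) ∧ PySem.List.pyGet? cs r2.2 = some '}' then
    (r1.1, if r2.1 = 0 then -1 else r2.1, r2.2 + 1)
  else (0, 0, 0)  -- raise ValueError (and the IndexError path): outside Pre_

-- ===== PORT B =====
-- _to_int(digits): value = value * 10 + int(ch) over the characters; int(ch) is
-- PySem.Int.ofChars? [ch] (getD 0 is its ValueError path, unreachable after validation)
def pvToInt (d : List Char) : Int :=
  d.foldl (fun v c => v * 10 + (PySem.Int.ofChars? [c]).getD 0) 0

def parse_repeat_range_alt (pattern : String) (position : Int) : Int × Int × Int :=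
  let e := PySem.Str.findFrom pattern "}" position        -- pattern.find('}', position)
  if e = -1 then (0, 0, 0)  -- raise ValueError: outside Pre_
  else
    let body := PySem.List.slice pattern.toList (some position) (some e)  -- pattern[position:end]
    let head := body.takeWhile (· ≠ ',')                  -- body.partition(',')
    let tail := (body.drop head.length).drop 1
    if head.all Char.isDigit ∧ tail.all Char.isDigit then -- all(c.isdigit() ...)
      (pvToInt head,
       if pvToInt tail = 0 then -1 else pvToInt tail,
       position + body.length + 1)
    else (0, 0, 0)  -- raise ValueError: outside Pre_

-- ===== PRECONDITION & SPEC =====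
-- the effective start index of A's scan (Python's negative indexing) and the body it scans
def pvEff (pattern : String) (position : Int) : Int :=
  if position < 0 then position + pattern.toList.length else position

def pvBody (pattern : String) (position : Int) : List Char :=
  ((pattern.toList.drop (pvEff pattern position).toNat).takeWhile (· ≠ '}'))

-- Pre_ = the inputs on which A returns: a '}' is reachable from the (possibly negative) position and
-- everything before it is digits with at most one comma.  Besides A's ValueError/IndexError inputs this
-- excludes negative positions whose digit scan runs off the end of the string: there A's negative
-- indexing wraps back to the string's START and can still return a value, while B raises ValueError
-- (see the cite in claim.json).
def Pre_parse_repeat_range (pattern : String) (position : Int) : Prop :=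
  0 ≤ pvEff pattern position ∧
  '}' ∈ pattern.toList.drop (pvEff pattern position).toNat ∧
  (pvBody pattern position).count ',' ≤ 1 ∧
  (pvBody pattern position).all (fun c => c == ',' || c.isDigit) = true

instance (pattern : String) (position : Int) : Decidable (Pre_parse_repeat_range pattern position) := by
  unfold Pre_parse_repeat_range; infer_instance

def pvWitness_parse_repeat_range : String × Int := ("2,5}", 0)

def Spec_parse_repeat_range (pattern : String) (position : Int) (out : Int × Int × Int) : Prop := out = parse_repeat_range_alt pattern position
instance (pattern : String) (position : Int) (out : Int × Int × Int) : Decidable (Spec_parse_repeat_range pattern position out) := by unfold Spec_parse_repeat_range; infer_instance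

-- ===== CLAIM (what is proved, stated in full; the proofs are below) =====
def Claim_equal_parse_repeat_range : Prop := ∀ (pattern : String) (position : Int), Dom_parse_repeat_range pattern position → Pre_parse_repeat_range pattern position → Spec_parse_repeat_range pattern position (parse_repeat_range pattern position)

-- ===== LEMMAS AND PROOFS =====

-- Python indexing at (j : Nat) + off, where off is 0 or -len: both address cs[j]
lemma pvGet_off (cs : List Char) (off : Int) (hoff : off = 0 ∨ off = -(cs.length : Int))
    (j : Nat) (hj : j < cs.length) :
    PySem.List.pyGet? cs ((j : Int) + off) = cs[j]? := by
  rcases hoff with h | h <;> subst h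
  · simp [PySem.List.pyGet?_natCast]
  · simp only [PySem.List.pyGet?, PySem.List.pyIdx?]
    have h1 : ¬ (0 ≤ (j : Int) + -(cs.length : Int)) := by omega
    have h2 : -((cs.length : Int)) ≤ (j : Int) + -(cs.length : Int) := by omega
    simp only [if_neg h1, if_pos h2]
    simp only [Option.bind_some]
    congr 1
    omega

-- int(ch) on an ASCII digit character
lemma pvOfChars_digit (c : Char) (h : c.isDigit = true) :
    PySem.Int.ofChars? [c] = some ((c.toNat : Int) - 48) := by
  have hb1 : 48 ≤ c.toNat := by simp [Char.isDigit] at h; exact h.1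
  have hb2 : c.toNat ≤ 57 := by simp [Char.isDigit] at h; exact h.2
  have hc : c = Char.ofNat c.toNat := (Char.ofNat_toNat c).symm
  interval_cases hcase : (c.toNat) <;> rw [hc] <;> decide

lemma pvToInt_nil : pvToInt [] = 0 := rfl

lemma pvToInt_foldl (d : List Char) (acc : Int) :
    d.foldl (fun v c => v * 10 + (PySem.Int.ofChars? [c]).getD 0) acc
      = acc * 10 ^ d.length + pvToInt d := by
  induction d generalizing acc with
  | nil => simp [pvToInt]
  | cons x d ih =>
    have hx : pvToInt (x :: d) = (0 * 10 + (PySem.Int.ofChars? [x]).getD 0) * 10 ^ d.length + pvToInt d := by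
      show (x :: d).foldl _ 0 = _
      simp only [List.foldl_cons]
      rw [ih]
    simp only [List.foldl_cons, List.length_cons]
    rw [ih, hx]
    ring

lemma pvToInt_cons (x : Char) (d : List Char) (hx : x.isDigit = true) :
    pvToInt (x :: d) = ((x.toNat : Int) - 48) * 10 ^ d.length + pvToInt d := by
  show (x :: d).foldl _ 0 = _
  simp only [List.foldl_cons]
  rw [pvToInt_foldl, pvOfChars_digit x hx]
  simp

-- A's scanning loop over a block of digits followed by a non-digit stop character
lemma pvAScan_eq (cs : List Char) (off : Int) (hoff : off = 0 ∨ off = -(cs.length : Int))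
    (j : Nat) (d : List Char) (c : Char) (r : List Char) (acc : Int)
    (hsplit : cs.drop j = d ++ c :: r)
    (hd : ∀ x ∈ d, x.isDigit = true)
    (hc : c.isDigit = false) :
    pvAScan cs ((j : Int) + off) acc = (acc * 10 ^ d.length + pvToInt d, (j : Int) + d.length + off) := by
  induction d generalizing j acc with
  | nil =>
    have hj : j < cs.length := by
      by_contra hge
      rw [List.drop_eq_nil_of_le (by omega)] at hsplit
      simp at hsplit
    have hget : cs[j]? = some c := by
      have h0 : (cs.drop j)[0]? = cs[j+0]? := List.getElem?_drop
      rw [hsplit] at h0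
      simpa using h0.symm
    rw [pvAScan]
    have hoff' : (j : Int) + off < (cs.length : Int) := by rcases hoff with h|h <;> omega
    rw [pvGet_off cs off hoff j hj, hget]
    simp [hc, pvToInt_nil]
  | cons x d ih =>
    have hj : j < cs.length := by
      by_contra hge
      rw [List.drop_eq_nil_of_le (by omega)] at hsplit
      simp at hsplit
    have hget : cs[j]? = some x := by
      have h0 : (cs.drop j)[0]? = cs[j+0]? := List.getElem?_drop
      rw [hsplit] at h0
      simpa using h0.symm
    have hx : x.isDigit = true := hd x (by simp)
    have hdrop : cs.drop (j + 1) = d ++ c :: r := by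
      have h0 : (cs.drop j).tail = cs.drop (j+1) := List.tail_drop
      rw [hsplit] at h0
      simpa using h0.symm
    rw [pvAScan]
    have hoff' : (j : Int) + off < (cs.length : Int) := by rcases hoff with h|h <;> omega
    rw [pvGet_off cs off hoff j hj, hget]
    simp only [Option.map_some, Option.getD_some, hx, and_true]
    rw [dif_pos hoff']
    have hrec := ih (j + 1) (acc * 10 + ((x.toNat : Int) - 48)) hdrop (fun y hy => hd y (by simp [hy]))
    have hcast : ((j : Int) + off) + 1 = ((j + 1 : Nat) : Int) + off := by push_cast; ring
    rw [hcast, hrec, pvToInt_cons x d hx]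
    simp only [Prod.mk.injEq]
    constructor
    · simp only [List.length_cons]
      ring
    · simp only [List.length_cons]
      push_cast
      ring

-- splitting a list at the first occurrence of an element
lemma pvSplit_first {x : Char} {t : List Char} (h : x ∈ t) :
    t = t.takeWhile (· ≠ x) ++ x :: (t.dropWhile (· ≠ x)).tail ∧ x ∉ t.takeWhile (· ≠ x) := by
  induction t with
  | nil => simp at h
  | cons y t ih =>
    by_cases hy : y = x
    · subst hy
      simp [List.takeWhile, List.dropWhile]
    · have hx : x ∈ t := by
        rcases List.mem_cons.mp h with h1 | h1
        · exact absurd h1.symm hy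
        · exact h1
      obtain ⟨h1, h2⟩ := ih hx
      simp only [List.takeWhile_cons, List.dropWhile_cons] at *
      simp only [show (decide (y ≠ x)) = true by simp [hy], if_true]
      constructor
      · rw [List.cons_append]
        congr 1
      · simp only [List.mem_cons]
        rintro (h3 | h3)
        · exact hy h3.symm
        · exact h2 h3

lemma pvTakeWhile_all (p : Char → Bool) (a : List Char) (ha : ∀ c ∈ a, p c = true) :
    a.takeWhile p = a := by
  induction a with
  | nil => simp
  | cons y a ih =>
    simp [ha y (by simp), ih (fun c hc => ha c (by simp [hc]))]

lemma pvFind_go (pre rest : List Char) (k : Nat) (hp : '}' ∉ pre) :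
    PySem.Chars.find.go ['}'] (pre ++ '}' :: rest) k = (k : Int) + pre.length := by
  induction pre generalizing k with
  | nil =>
    rw [PySem.Chars.find.go.eq_def]
    simp [List.isPrefixOf]
  | cons y pre ih =>
    have hy : y ≠ '}' := by intro h; exact hp (by simp [h])
    rw [List.cons_append, PySem.Chars.find.go.eq_def]
    have hpref : List.isPrefixOf ['}'] (y :: (pre ++ '}' :: rest)) = false := by
      simp [List.isPrefixOf]
      intro h; exact absurd h.symm hy
    simp only []
    rw [hpref]
    simp only [Bool.false_eq_true, if_false]
    rw [ih (k + 1) (fun h => hp (by simp [h]))]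
    simp only [List.length_cons]
    push_cast
    ring

-- ===== VERDICT (by name: the statement is the Claim_ definition above) =====
theorem parse_repeat_range_spec : Claim_equal_parse_repeat_range := by
  intro pattern position _hdom hpre
  obtain ⟨heff, hmem, hcnt, hdigb⟩ := hpre
  unfold Spec_parse_repeat_range
  unfold pvBody at hcnt hdigb
  have hdig : ∀ c ∈ ((pattern.toList.drop (pvEff pattern position).toNat).takeWhile (· ≠ '}')), c = ',' ∨ c.isDigit = true := by
    intro c hc
    have hb := List.all_eq_true.mp hdigb c hc
    simp only [Bool.or_eq_true, beq_iff_eq] at hb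
    exact hb
  clear hdigb
  set cs := pattern.toList with hcs
  set j0 : Nat := (pvEff pattern position).toNat with hj0
  obtain ⟨off, hoff, hposition⟩ :
      ∃ off : Int, (off = 0 ∨ off = -(cs.length : Int)) ∧ position = (j0 : Int) + off := by
    unfold pvEff at heff hj0
    simp only [← hcs] at heff hj0
    by_cases hp : position < 0
    · rw [if_pos hp] at heff hj0
      exact ⟨-(cs.length : Int), Or.inr rfl, by omega⟩
    · rw [if_neg hp] at heff hj0
      exact ⟨0, Or.inl rfl, by omega⟩
  obtain ⟨hsplit, hnotin⟩ := pvSplit_first hmem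
  set pre := (cs.drop j0).takeWhile (· ≠ '}') with hpredef
  set rest := ((cs.drop j0).dropWhile (· ≠ '}')).tail with hrestdef
  set m := pre.length with hm
  have hlen : j0 + m < cs.length := by
    have hl := congrArg List.length hsplit
    simp [List.length_drop] at hl
    omega
  have hgbrace : cs[j0 + m]? = some '}' := by
    have h0 : (cs.drop j0)[m]? = cs[j0 + m]? := List.getElem?_drop
    rw [hsplit] at h0
    rw [← h0, List.getElem?_append_right (by omega)]
    simp [hm]
  have hgetbm : PySem.List.pyGet? cs (((j0 : Int) + m) + off) = some '}' := by
    have h1 := pvGet_off cs off hoff (j0 + m) hlen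
    rw [hgbrace] at h1
    have h2 : ((j0 : Int) + m) + off = (((j0 + m : Nat)) : Int) + off := by push_cast; ring
    rw [h2]
    exact h1
  have hboundm : ((j0 : Int) + m) + off < (cs.length : Int) := by
    rcases hoff with h | h <;> omega
  -- the B-side find('}', position) returns the absolute index j0 + m
  have htl : ("}" : String).toList = ['}'] := rfl
  have hfind : PySem.Chars.findFrom cs ['}'] position none = (j0 : Int) + m := by
    simp only [PySem.Chars.findFrom]
    have hst : (if position < 0 then if position + (cs.length : Int) < 0 then 0 else position + (cs.length : Int) else position) = ((j0 : Int)) := by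
      rcases hoff with h | h <;> subst h <;> split_ifs <;> omega
    rw [hst]
    rw [if_neg (by omega)]
    have htake : List.take ((cs.length : Int)).toNat cs = cs := by
      simp
    have htn : ((j0 : Int)).toNat = j0 := by omega
    rw [htake, htn]
    have hfval : PySem.Chars.find (List.drop j0 cs) ['}'] = (m : Int) := by
      unfold PySem.Chars.find
      rw [hsplit, pvFind_go pre rest 0 hnotin]
      simp [hm]
    rw [hfval]
    rw [if_neg (by omega)]
  have hbody : PySem.List.slice cs (some position) (some ((j0 : Int) + m)) = pre := by
    unfold PySem.List.slice PySem.List.clampIdx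
    simp only []
    have ha : (if position < 0 then if (cs.length : Int) + position < 0 then 0 else ((cs.length : Int) + position).toNat else min position.toNat cs.length) = j0 := by
      rcases hoff with h | h <;> subst h <;> split_ifs <;> omega
    have hb : (if ((j0 : Int) + m) < 0 then if (cs.length : Int) + ((j0 : Int) + m) < 0 then 0 else ((cs.length : Int) + ((j0 : Int) + m)).toNat else min ((j0 : Int) + m).toNat cs.length) = j0 + m := by
      split_ifs <;> omega
    rw [ha, hb]
    have hd : j0 + m - j0 = m := by omega
    rw [hd, hsplit, hm, List.take_left]
  by_cases hcm : ',' ∈ pre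
  · obtain ⟨hsplit2, hnotin2⟩ := pvSplit_first hcm
    set hd1 := pre.takeWhile (· ≠ ',') with hh1
    set tl := (pre.dropWhile (· ≠ ',')).tail with htl2
    have hlen2 : hd1.length + 1 + tl.length = m := by
      have hl2 := congrArg List.length hsplit2
      simp at hl2
      omega
    have hcm_tl : ',' ∉ tl := by
      have hc := congrArg (fun l => List.count ',' l) hsplit2
      simp [List.count_append] at hc
      have h0 : List.count ',' hd1 = 0 := List.count_eq_zero.mpr hnotin2
      intro hmem2
      have hpos2 : 0 < List.count ',' tl := List.count_pos_iff.mpr hmem2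
      omega
    have hdigh : ∀ x ∈ hd1, x.isDigit = true := by
      intro x hx
      have hxpre : x ∈ pre := by rw [hsplit2]; exact List.mem_append_left _ hx
      rcases hdig x hxpre with h | h
      · exact absurd (h ▸ hx) hnotin2
      · exact h
    have hdigt : ∀ x ∈ tl, x.isDigit = true := by
      intro x hx
      have hxpre : x ∈ pre := by
        rw [hsplit2]
        exact List.mem_append_right _ (List.mem_cons_of_mem _ hx)
      rcases hdig x hxpre with h | h
      · exact absurd (h ▸ hx) hcm_tl
      · exact h
    have hsplitA : cs.drop j0 = hd1 ++ ',' :: (tl ++ '}' :: rest) := by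
      rw [hsplit, hsplit2]
      simp
    have hscan1 : pvAScan cs position 0 = (0 * 10 ^ hd1.length + pvToInt hd1, (j0 : Int) + hd1.length + off) := by
      rw [hposition]
      exact pvAScan_eq cs off hoff j0 hd1 ',' (tl ++ '}' :: rest) 0 hsplitA hdigh (by decide)
    have hb1 : j0 + hd1.length < cs.length := by omega
    have hgcomma : PySem.List.pyGet? cs ((j0 : Int) + hd1.length + off) = some ',' := by
      have hg : cs[j0 + hd1.length]? = some ',' := by
        have h0 : (cs.drop j0)[hd1.length]? = cs[j0 + hd1.length]? := List.getElem?_drop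
        rw [hsplitA] at h0
        rw [← h0, List.getElem?_append_right (le_refl _)]
        simp
      have hp1 := pvGet_off cs off hoff (j0 + hd1.length) hb1
      rw [hg] at hp1
      rw [show (j0 : Int) + hd1.length + off = (((j0 + hd1.length : Nat)) : Int) + off by push_cast; ring]
      exact hp1
    have hdrop2 : cs.drop (j0 + (hd1.length + 1)) = tl ++ '}' :: rest := by
      have hdd : cs.drop (j0 + (hd1.length + 1)) = (cs.drop j0).drop (hd1.length + 1) := by
        rw [List.drop_drop]
      rw [hdd, hsplitA]
      rw [show hd1 ++ ',' :: (tl ++ '}' :: rest) = (hd1 ++ [',']) ++ (tl ++ '}' :: rest) by simp]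
      rw [show hd1.length + 1 = (hd1 ++ [',']).length by simp]
      exact List.drop_left
    have hscan2 : pvAScan cs ((j0 : Int) + hd1.length + off + 1) 0 =
        (0 * 10 ^ tl.length + pvToInt tl, ((j0 + (hd1.length + 1) : Nat) : Int) + tl.length + off) := by
      rw [show (j0 : Int) + hd1.length + off + 1 = (((j0 + (hd1.length + 1) : Nat)) : Int) + off by push_cast; ring]
      exact pvAScan_eq cs off hoff (j0 + (hd1.length + 1)) tl '}' rest 0 hdrop2 hdigt (by decide)
    simp only [parse_repeat_range, parse_repeat_range_alt, PySem.Str.findFrom_eq, htl, ← hcs, hfind, hscan1]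
    have hyc : (j0 : Int) + hd1.length + off < (cs.length : Int) ∧ PySem.List.pyGet? cs ((j0 : Int) + hd1.length + off) = some ',' := ⟨by rcases hoff with h|h <;> omega, hgcomma⟩
    rw [if_pos hyc]
    rw [hscan2]
    rw [show ((j0 + (hd1.length + 1) : Nat) : Int) + tl.length + off = (j0 : Int) + m + off by push_cast; omega]
    rw [if_pos ⟨hboundm, hgetbm⟩]
    rw [if_neg (show ¬((j0 : Int) + m = -1) by omega)]
    rw [hbody]
    rw [← hh1]
    have hdrophead : pre.drop hd1.length = ',' :: tl := by
      rw [hsplit2]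
      exact List.drop_left
    rw [hdrophead]
    rw [show (',' :: tl).drop 1 = tl from rfl]
    have hgd : hd1.all Char.isDigit = true ∧ tl.all Char.isDigit = true :=
      ⟨List.all_eq_true.mpr hdigh, List.all_eq_true.mpr hdigt⟩
    rw [if_pos hgd]
    simp only [zero_mul, zero_add, Prod.mk.injEq]
    refine ⟨trivial, trivial, ?_⟩
    rw [hposition, hm]
    ring
  · have hdigits : ∀ x ∈ pre, x.isDigit = true := by
      intro x hx
      rcases hdig x hx with h | h
      · exact absurd (h ▸ hx) hcm
      · exact h
    have hscan1 : pvAScan cs position 0 = (0 * 10 ^ pre.length + pvToInt pre, (j0 : Int) + pre.length + off) := by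
      rw [hposition]
      exact pvAScan_eq cs off hoff j0 pre '}' rest 0 hsplit hdigits (by decide)
    simp only [parse_repeat_range, parse_repeat_range_alt, PySem.Str.findFrom_eq, htl, ← hcs, hfind, hscan1]
    simp only [← hm]
    have hnc : ¬((j0 : Int) + m + off < (cs.length : Int) ∧ PySem.List.pyGet? cs ((j0 : Int) + m + off) = some ',') := by
      rintro ⟨-, h2⟩
      rw [hgetbm] at h2
      simp at h2
    rw [if_neg hnc]
    rw [if_pos ⟨hboundm, hgetbm⟩]
    rw [if_neg (show ¬((j0 : Int) + m = -1) by omega)]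
    rw [hbody]
    rw [pvTakeWhile_all _ pre (fun c hc => by simp; intro he; exact hcm (he ▸ hc))]
    rw [List.drop_length]
    simp only [List.drop_nil]
    rw [if_pos (show pre.all Char.isDigit = true ∧ ([] : List Char).all Char.isDigit = true from ⟨List.all_eq_true.mpr (fun c hc => hdigits c hc), by simp⟩)]
    simp only [pvToInt_nil, if_true, Prod.mk.injEq]
    refine ⟨by ring, by simp, ?_⟩
    rw [hposition, hm]
    ring
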